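-- pv_equiv track=rewrite | github.com/maximepasquier/Complex-contagion | src/LTM_infection_plot_waiting.py | extend_points
-- ===== SOURCE A (Python) =====
-- def extend_points(val,counts):
--     """
--     Fonction pour étendre les points de val et counts
--     """
--     extended_val = []
--     extended_counts = []
--
--     tmp = 0
--     for v, c in zip(val, counts):
--         extended_val.append(v)
--         extended_val.append(v)
--         extended_counts.append(tmp)
--         extended_counts.append(c)
--         tmp = c
--
--     return extended_val, extended_counts
-- ===== SOURCE B (Python) =====
-- def extend_points(val, counts):
--     """
--     Fonction pour étendre les points de val et counts
--     """
--     val = list(val)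
--     counts = list(counts)
--     n = min(len(val), len(counts))
--     extended_val = [val[i // 2] for i in range(2 * n)]
--     extended_counts = [counts[(i - 1) // 2] if i > 0 else 0 for i in range(2 * n)]
--     return extended_val, extended_counts
-- ===== Notes on version B (the rewrite author's own statement) =====
-- stated objective: alternative
-- what changed: Replaces A's fused accumulator loop (threading tmp) by a closed-form index-arithmetic construction: each output position i is computed directly as val[i//2] resp. counts[(i-1)//2] (0 at i=0), with no interleaving, no carried state and no shifted table.
import Mathlib
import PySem

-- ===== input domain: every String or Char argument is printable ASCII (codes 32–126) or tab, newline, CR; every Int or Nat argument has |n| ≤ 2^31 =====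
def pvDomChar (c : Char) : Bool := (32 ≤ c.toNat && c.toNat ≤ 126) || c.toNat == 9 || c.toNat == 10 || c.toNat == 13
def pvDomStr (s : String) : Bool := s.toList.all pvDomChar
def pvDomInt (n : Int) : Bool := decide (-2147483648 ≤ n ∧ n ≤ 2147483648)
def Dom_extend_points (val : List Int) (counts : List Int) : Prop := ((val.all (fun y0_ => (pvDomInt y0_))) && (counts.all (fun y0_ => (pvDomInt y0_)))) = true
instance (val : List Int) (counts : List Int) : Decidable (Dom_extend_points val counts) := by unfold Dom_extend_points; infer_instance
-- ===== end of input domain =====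

-- B replaces A's fused accumulator loop (tmp threading) by a closed-form index-arithmetic construction of each output position; same cost, alternative algorithmic decomposition.


-- ===== PORT A =====
-- Fused loop over zip val counts, threading state (extended_val, extended_counts, tmp).
def extend_points (val : List Int) (counts : List Int) : List Int × List Int :=
  let st := (List.zip val counts).foldl
    (fun (s : List Int × List Int × Int) vc =>
      (s.1 ++ [vc.1, vc.1], s.2.1 ++ [s.2.2, vc.2], vc.2))
    ([], [], 0)
  (st.1, st.2.1)

-- ===== PORT B =====
-- Closed-form per-index construction over range(2*n); indices i//2 and (i-1)//2 (taken only
-- when i > 0) are always in range, so getD's default is never used — exact port of Source B's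
-- nonnegative in-range indexing.
def extend_points_alt (val : List Int) (counts : List Int) : List Int × List Int :=
  let n := min val.length counts.length
  let extended_val := (List.range (2 * n)).map (fun i => val.getD (i / 2) 0)
  let extended_counts := (List.range (2 * n)).map
    (fun i => if 0 < i then counts.getD ((i - 1) / 2) 0 else 0)
  (extended_val, extended_counts)

-- ===== PRECONDITION & SPEC =====
def Spec_extend_points (val : List Int) (counts : List Int) (out : List Int × List Int) : Prop := out = extend_points_alt val counts
instance (val : List Int) (counts : List Int) (out : List Int × List Int) : Decidable (Spec_extend_points val counts out) := by unfold Spec_extend_points; infer_instance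

-- ===== CLAIM (what is proved, stated in full; the proofs are below) =====
def Claim_equal_extend_points : Prop := ∀ (val : List Int) (counts : List Int), Dom_extend_points val counts → Spec_extend_points val counts (extend_points val counts)

-- ===== LEMMAS AND PROOFS =====

theorem range_add_two (n : Nat) :
    List.range (n + 2) = 0 :: 1 :: (List.range n).map (· + 2) := by
  rw [List.range_succ_eq_map, List.range_succ_eq_map, List.map_cons, List.map_map]
  exact congrArg (0 :: 1 :: ·) (List.map_congr_left (fun i _ => by simp [Nat.add_assoc]))

theorem extend_points_main : ∀ (val counts a1 a2 : List Int) (t : Int),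
    (List.zip val counts).foldl
      (fun (s : List Int × List Int × Int) vc =>
        (s.1 ++ [vc.1, vc.1], s.2.1 ++ [s.2.2, vc.2], vc.2)) (a1, a2, t)
    = (a1 ++ (List.range (2 * min val.length counts.length)).map
          (fun i => val.getD (i / 2) 0),
       a2 ++ (List.range (2 * min val.length counts.length)).map
          (fun i => if 0 < i then counts.getD ((i - 1) / 2) 0 else t),
       (counts.take (min val.length counts.length)).foldl (fun _ c => c) t) := by
  intro val
  induction val with
  | nil => intro counts a1 a2 t; simp
  | cons v vs ih =>
    intro counts a1 a2 t
    cases counts with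
    | nil => simp
    | cons c cs =>
      simp only [List.zip_cons_cons, List.foldl_cons, List.length_cons,
        Nat.succ_min_succ, List.take_succ_cons]
      rw [ih cs (a1 ++ [v, v]) (a2 ++ [t, c]) c]
      have h2 : 2 * (min vs.length cs.length + 1)
          = 2 * min vs.length cs.length + 2 := by ring
      rw [h2, range_add_two]
      simp only [List.map_cons, List.map_map]
      refine Prod.ext ?_ (Prod.ext ?_ rfl)
      · simp only [List.append_assoc]
        refine congrArg (a1 ++ ·) ?_
        simp only [Function.comp_def, List.cons_append, List.nil_append,
          show (0 : Nat) / 2 = 0 from rfl, List.getD_cons_zero]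
        refine congrArg₂ (fun a b => a :: a :: b) rfl ?_
        exact List.map_congr_left (fun i _ => by
          have h : (i + 2) / 2 = i / 2 + 1 := by omega
          simp [h])
      · simp only [List.append_assoc]
        refine congrArg (a2 ++ ·) ?_
        simp only [Function.comp_def, List.cons_append, List.nil_append,
          show ¬ (0 : Nat) < 0 from by omega, show (0 : Nat) < 1 from by omega,
          show ((1 : Nat) - 1) / 2 = 0 from rfl, List.getD_cons_zero,
          if_true, if_false]
        refine congrArg₂ (fun a b => t :: a :: b) rfl ?_
        exact List.map_congr_left (fun i _ => by
          rcases Nat.eq_zero_or_pos i with h | h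
          · subst h; simp
          · have h1 : 0 < i + 2 := by omega
            have h3 : (i + 1) / 2 = (i - 1) / 2 + 1 := by omega
            simp [h1, h3, if_pos h])

-- ===== VERDICT (by name: the statement is the Claim_ definition above) =====
theorem extend_points_spec : Claim_equal_extend_points := by
  intro val counts _
  show _ = _
  simp [extend_points, extend_points_alt, extend_points_main]
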